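-- pv_equiv track=rewrite | github.com/surpmh/algorithms | Programmers/level2/70129.py | solution
-- ===== SOURCE A (Python) =====
-- def solution(s):
--     answer = [0, 0]
--
--     while s != "1":
--         answer[1] += s.count("0")
--         s = s.replace("0", "")
--         s = bin(len(s))[2:]
--         answer[0] += 1
--
--     return answer
-- ===== SOURCE B (Python) =====
-- def solution(s):
--     if s == "1":
--         return [0, 0]
--     zeros = s.count("0")
--     steps, z = solution(format(len(s) - zeros, "b"))
--     return [steps + 1, z + zeros]
-- ===== Notes on version B (the rewrite author's own statement) =====
-- stated objective: simpler
-- what changed: B replaces A's while loop that mutates an answer list (count zeros, strip them with replace, re-render bin(len)) by a direct recursion: it computes the kept length arithmetically as len(s) - s.count('0') without ever building the zero-stripped string, recurses on the next binary rendition, and assembles [steps, zeros] back-to-front from the recursive result.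
import Mathlib
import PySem

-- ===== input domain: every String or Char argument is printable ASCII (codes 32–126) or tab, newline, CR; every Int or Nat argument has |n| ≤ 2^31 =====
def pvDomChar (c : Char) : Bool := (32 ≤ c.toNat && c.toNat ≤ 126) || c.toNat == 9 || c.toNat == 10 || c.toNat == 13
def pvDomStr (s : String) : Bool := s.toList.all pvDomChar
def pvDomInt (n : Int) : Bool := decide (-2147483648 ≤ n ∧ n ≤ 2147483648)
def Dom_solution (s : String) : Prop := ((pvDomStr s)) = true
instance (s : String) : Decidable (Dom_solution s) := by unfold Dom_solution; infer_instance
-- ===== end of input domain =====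

-- B replaces A's mutate-a-list while loop by a recursion that computes the kept length
-- arithmetically (len - count '0') and assembles the answer back-to-front; objective: simpler.

-- ===== PORT A =====
-- bin(n)[2:] (digit list, most significant first); binChars also covers bin(0)[2:] = "0"
def binAux : Nat → List Char
  | 0 => []
  | n + 1 => binAux ((n + 1) / 2) ++ [if (n + 1) % 2 = 1 then '1' else '0']
decreasing_by exact Nat.div_lt_self (Nat.succ_pos n) (by omega)

def binChars (n : Nat) : List Char := if n = 0 then ['0'] else binAux n

-- the while loop of A; `fuel` only makes the (possibly nonterminating) loop total
def solutionLoop (fuel : Nat) (s : List Char) (steps zeros : Int) : List Int :=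
  match fuel with
  | 0 => [steps, zeros]
  | fuel + 1 =>
    if s = ['1'] then [steps, zeros]
    else
      -- answer[1] += s.count("0"); s = s.replace("0",""); s = bin(len(s))[2:]
      let zeros' := zeros + (s.count '0' : Int)
      let s' := s.filter (fun c => c ≠ '0')
      solutionLoop fuel (binChars s'.length) (steps + 1) zeros'

def solution (s : String) : List Int := solutionLoop (s.length + 2) s.toList 0 0

-- ===== PORT B =====
-- B's recursion; `fuel` only makes the (possibly nonterminating) recursion total
def altGo (fuel : Nat) (s : List Char) : Int × Int :=
  match fuel with
  | 0 => (0, 0)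
  | fuel + 1 =>
    if s = ['1'] then (0, 0)
    else
      let zeros := s.count '0'
      let r := altGo fuel (binChars (s.length - zeros))
      (r.1 + 1, r.2 + (zeros : Int))

def solution_alt (s : String) : List Int :=
  let r := altGo (s.length + 2) s.toList
  [r.1, r.2]

-- ===== PRECONDITION & SPEC =====
-- On strings consisting only of '0' characters (including the empty string) neither Python
-- returns (A loops forever, B's recursion never reaches its base case); the fuelled ports
-- still agree with each other there, so no Pre_ is needed.
def Spec_solution (s : String) (out : List Int) : Prop := out = solution_alt s
instance (s : String) (out : List Int) : Decidable (Spec_solution s out) := by unfold Spec_solution; infer_instance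

-- ===== CLAIM (what is proved, stated in full; the proofs are below) =====
def Claim_equal_solution : Prop := ∀ (s : String), Dom_solution s → Spec_solution s (solution s)

-- ===== LEMMAS AND PROOFS =====

-- the zero-stripped string A builds has exactly the length B computes arithmetically
theorem filter_length (l : List Char) :
    (l.filter (fun c => c ≠ '0')).length + l.count '0' = l.length := by
  induction l with
  | nil => simp
  | cons a t ih =>
    simp only [ne_eq, decide_not] at ih
    by_cases ha : a = '0' <;> simp [ha] <;> omega

-- with the same fuel, A's loop computes B's recursion with the accumulators added on
theorem loop_eq (fuel : Nat) : ∀ (s : List Char) (steps zeros : Int),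
    solutionLoop fuel s steps zeros
      = [steps + (altGo fuel s).1, zeros + (altGo fuel s).2] := by
  induction fuel with
  | zero => intro s steps zeros; simp [solutionLoop, altGo]
  | succ fuel ih =>
    intro s steps zeros
    rw [solutionLoop, altGo]
    by_cases h1 : s = ['1']
    · simp [h1]
    · simp only [if_neg h1]
      have hf := filter_length s
      have hlen : (s.filter (fun c => c ≠ '0')).length = s.length - s.count '0' := by omega
      rw [ih, hlen]
      simp only [List.cons.injEq, and_true]
      exact ⟨by ring, by ring⟩

-- ===== VERDICT (by name: the statement is the Claim_ definition above) =====
theorem solution_spec : Claim_equal_solution := by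
  intro s _
  unfold Spec_solution solution solution_alt
  rw [loop_eq]
  simp
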